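-- pv_equiv track=rewrite | github.com/Razamindset/pawnstar-python | src/main.py | parse_time_control
-- ===== SOURCE A (Python) =====
-- def parse_time_control(parts):
--     """Parse UCI go command for time control."""
--     wtime = btime = winc = binc = movestogo = movetime = None
--     depth = 4  # default depth
--
--     i = 1  # skip 'go'
--     while i < len(parts):
--         if parts[i] == "wtime" and i + 1 < len(parts):
--             wtime = int(parts[i + 1])
--             i += 2
--         elif parts[i] == "btime" and i + 1 < len(parts):
--             btime = int(parts[i + 1])
--             i += 2
--         elif parts[i] == "winc" and i + 1 < len(parts):
--             winc = int(parts[i + 1])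
--             i += 2
--         elif parts[i] == "binc" and i + 1 < len(parts):
--             binc = int(parts[i + 1])
--             i += 2
--         elif parts[i] == "movestogo" and i + 1 < len(parts):
--             movestogo = int(parts[i + 1])
--             i += 2
--         elif parts[i] == "movetime" and i + 1 < len(parts):
--             movetime = int(parts[i + 1])
--             i += 2
--         elif parts[i] == "depth" and i + 1 < len(parts):
--             depth = int(parts[i + 1])
--             i += 2
--         elif parts[i] == "infinite":
--             depth = 20
--             i += 1
--         else:
--             i += 1
--
--     return wtime, btime, winc, binc, movestogo, movetime, depth
-- ===== SOURCE B (Python) =====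
-- _KEYWORDS = ("wtime", "btime", "winc", "binc", "movestogo", "movetime", "depth")
--
--
-- def parse_time_control(parts):
--     """Parse UCI go command for time control."""
--     # Position-independent pass: no token consumption / index jumping.  Correct on all
--     # inputs where A returns, because every value token is an int-string and therefore
--     # never itself a keyword or "infinite", so examining it too is a no-op.
--     n = len(parts)
--     vals = {}
--     for j in range(1, n):
--         tok = parts[j]
--         if tok == "infinite":
--             vals["depth"] = 20
--         elif tok in _KEYWORDS and j + 1 < n:
--             vals[tok] = int(parts[j + 1])
--     return (vals.get("wtime"), vals.get("btime"), vals.get("winc"),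
--             vals.get("binc"), vals.get("movestogo"), vals.get("movetime"),
--             vals.get("depth", 4))
-- ===== Notes on version B (the rewrite author's own statement) =====
-- stated objective: simpler
-- what changed: Replaces A's consuming while-loop state machine (seven copy-pasted branches, i advanced by 1 or 2 so value tokens are skipped) by a position-independent for-loop over every index that writes keyword hits into a dict read out at the end; it is correct because on inputs where A returns, value tokens are int-strings and hence never keywords, so visiting them too is a no-op.
import Mathlib
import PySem

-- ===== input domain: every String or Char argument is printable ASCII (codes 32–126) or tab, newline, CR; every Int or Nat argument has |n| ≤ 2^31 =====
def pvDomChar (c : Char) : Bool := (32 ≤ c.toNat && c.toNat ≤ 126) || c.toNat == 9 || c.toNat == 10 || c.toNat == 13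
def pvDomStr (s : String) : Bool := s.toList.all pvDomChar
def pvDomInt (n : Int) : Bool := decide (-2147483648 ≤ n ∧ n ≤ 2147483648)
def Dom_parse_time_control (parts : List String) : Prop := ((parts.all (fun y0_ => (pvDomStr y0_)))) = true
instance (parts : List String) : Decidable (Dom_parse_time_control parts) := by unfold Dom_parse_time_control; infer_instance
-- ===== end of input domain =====

-- B replaces A's consuming while-loop state machine by a position-independent for-loop over every
-- index writing keyword hits into a dict read out at the end (objective: simpler); A raises
-- ValueError when a keyword's value is not int-parsable, and Pre_ excludes exactly those inputs.


-- ===== PORT A =====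
-- int(s); the `none` case (Python ValueError) is excluded by Pre_parse_time_control, so the
-- default 0 is never reached on admitted inputs.
def pvPyInt (s : String) : Int := (PySem.Int.ofStr? s).getD 0

-- the while loop of A, state = (wtime, btime, winc, binc, movestogo, movetime, depth)
def pvALoop (parts : List String) (i : Nat)
    (wt bt wi bi mg mt : Option Int) (d : Int) :
    Option Int × Option Int × Option Int × Option Int × Option Int × Option Int × Int :=
  if i < parts.length then
    let tok := parts.getD i ""
    if tok = "wtime" ∧ i + 1 < parts.length then
      pvALoop parts (i + 2) (some (pvPyInt (parts.getD (i + 1) ""))) bt wi bi mg mt d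
    else if tok = "btime" ∧ i + 1 < parts.length then
      pvALoop parts (i + 2) wt (some (pvPyInt (parts.getD (i + 1) ""))) wi bi mg mt d
    else if tok = "winc" ∧ i + 1 < parts.length then
      pvALoop parts (i + 2) wt bt (some (pvPyInt (parts.getD (i + 1) ""))) bi mg mt d
    else if tok = "binc" ∧ i + 1 < parts.length then
      pvALoop parts (i + 2) wt bt wi (some (pvPyInt (parts.getD (i + 1) ""))) mg mt d
    else if tok = "movestogo" ∧ i + 1 < parts.length then
      pvALoop parts (i + 2) wt bt wi bi (some (pvPyInt (parts.getD (i + 1) ""))) mt d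
    else if tok = "movetime" ∧ i + 1 < parts.length then
      pvALoop parts (i + 2) wt bt wi bi mg (some (pvPyInt (parts.getD (i + 1) ""))) d
    else if tok = "depth" ∧ i + 1 < parts.length then
      pvALoop parts (i + 2) wt bt wi bi mg mt (pvPyInt (parts.getD (i + 1) ""))
    else if tok = "infinite" then
      pvALoop parts (i + 1) wt bt wi bi mg mt 20
    else
      pvALoop parts (i + 1) wt bt wi bi mg mt d
  else (wt, bt, wi, bi, mg, mt, d)
termination_by parts.length - i
decreasing_by all_goals omega

def parse_time_control (parts : List String) :
    Option Int × Option Int × Option Int × Option Int × Option Int × Option Int × Int :=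
  pvALoop parts 1 none none none none none none 4

-- ===== PORT B =====
def pvKeywords : List String := ["wtime", "btime", "winc", "binc", "movestogo", "movetime", "depth"]

-- B's for-loop: visits EVERY index j (no consumption), dict is the whole state
def pvBLoop (parts : List String) (j : Nat) (vals : PySem.Dict String Int) :
    PySem.Dict String Int :=
  if j < parts.length then
    let tok := parts.getD j ""
    pvBLoop parts (j + 1)
      (if tok = "infinite" then vals.insert "depth" 20
       else if pvKeywords.contains tok ∧ j + 1 < parts.length then
         vals.insert tok (pvPyInt (parts.getD (j + 1) ""))
       else vals)
  else vals
termination_by parts.length - j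
decreasing_by all_goals omega

def parse_time_control_alt (parts : List String) :
    Option Int × Option Int × Option Int × Option Int × Option Int × Option Int × Int :=
  let vals := pvBLoop parts 1 PySem.Dict.empty
  (vals.get? "wtime", vals.get? "btime", vals.get? "winc", vals.get? "binc",
   vals.get? "movestogo", vals.get? "movetime", vals.getD "depth" 4)

-- ===== PRECONDITION & SPEC =====
-- Pre_ excludes exactly the inputs on which Python A raises ValueError: a time-control keyword at
-- index ≥ 1 whose following element is not int-parsable (B raises ValueError there too).
def Pre_parse_time_control (parts : List String) : Prop :=
  ∀ j : Nat, 1 ≤ j → j + 1 < parts.length →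
    (parts.getD j "" = "wtime" ∨ parts.getD j "" = "btime" ∨ parts.getD j "" = "winc" ∨
     parts.getD j "" = "binc" ∨ parts.getD j "" = "movestogo" ∨ parts.getD j "" = "movetime" ∨
     parts.getD j "" = "depth") →
    (PySem.Int.ofStr? (parts.getD (j + 1) "")).isSome
instance (parts : List String) : Decidable (Pre_parse_time_control parts) := by
  unfold Pre_parse_time_control
  exact decidable_of_iff
    (∀ j ∈ List.range parts.length, 1 ≤ j → j + 1 < parts.length →
      (parts.getD j "" = "wtime" ∨ parts.getD j "" = "btime" ∨ parts.getD j "" = "winc" ∨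
       parts.getD j "" = "binc" ∨ parts.getD j "" = "movestogo" ∨ parts.getD j "" = "movetime" ∨
       parts.getD j "" = "depth") →
      (PySem.Int.ofStr? (parts.getD (j + 1) "")).isSome)
    (by constructor
        · intro h j h1 h2 hk; exact h j (List.mem_range.mpr (by omega)) h1 h2 hk
        · intro h j _ h1 h2 hk; exact h j h1 h2 hk)

def pvWitness_parse_time_control : List String := ["go", "wtime", "300", "infinite"]

def Spec_parse_time_control (parts : List String)
    (out : Option Int × Option Int × Option Int × Option Int × Option Int × Option Int × Int) :
    Prop := out = parse_time_control_alt parts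
instance (parts : List String)
    (out : Option Int × Option Int × Option Int × Option Int × Option Int × Option Int × Int) :
    Decidable (Spec_parse_time_control parts out) := by
  unfold Spec_parse_time_control
  -- instance search alone stops short at this product nesting depth; build the instance stepwise
  letI i2 : DecidableEq (Option Int × Option Int × Int) := instDecidableEqProd
  letI i3 : DecidableEq (Option Int × Option Int × Option Int × Int) := instDecidableEqProd
  letI i4 : DecidableEq (Option Int × Option Int × Option Int × Option Int × Int) := instDecidableEqProd
  letI i5 : DecidableEq (Option Int × Option Int × Option Int × Option Int × Option Int × Int) := instDecidableEqProd
  letI i6 : DecidableEq (Option Int × Option Int × Option Int × Option Int × Option Int × Option Int × Int) := instDecidableEqProd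
  exact i6 _ _

-- ===== CLAIM (what is proved, stated in full; the proofs are below) =====
def Claim_equal_parse_time_control : Prop := ∀ (parts : List String),
  Dom_parse_time_control parts → Pre_parse_time_control parts →
  Spec_parse_time_control parts (parse_time_control parts)

-- ===== LEMMAS AND PROOFS =====

-- an int-parsable token is neither a keyword nor "infinite"
lemma pvParsable_not_kw {s : String} (h : (PySem.Int.ofStr? s).isSome) :
    pvKeywords.contains s = false ∧ s ≠ "infinite" := by
  constructor
  · by_contra hc
    have hmem : s ∈ pvKeywords := by
      have := Bool.of_not_eq_false hc
      exact List.contains_iff_mem.mp this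
    simp [pvKeywords] at hmem
    rcases hmem with rfl | rfl | rfl | rfl | rfl | rfl | rfl <;> simp_all <;> revert h <;> decide
  · rintro rfl; revert h; decide

-- A's consuming loop equals B's full scan whenever the dict mirrors A's seven variables.
lemma pvLoop_eq (parts : List String) (hpre : Pre_parse_time_control parts) (i : Nat) (hi : 1 ≤ i)
    (vals : PySem.Dict String Int) (wt bt wi bi mg mt : Option Int) (d : Int)
    (hwt : vals.get? "wtime" = wt) (hbt : vals.get? "btime" = bt)
    (hwi : vals.get? "winc" = wi) (hbi : vals.get? "binc" = bi)
    (hmg : vals.get? "movestogo" = mg) (hmt : vals.get? "movetime" = mt)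
    (hd : vals.getD "depth" 4 = d) :
    pvALoop parts i wt bt wi bi mg mt d =
      (let v := pvBLoop parts i vals
       (v.get? "wtime", v.get? "btime", v.get? "winc", v.get? "binc",
        v.get? "movestogo", v.get? "movetime", v.getD "depth" 4)) := by
  rw [pvALoop, pvBLoop]
  by_cases hlen : i < parts.length
  · simp only [hlen, if_true]
    set tok := parts.getD i "" with htok
    by_cases h2 : i + 1 < parts.length
    · -- helper discharging one keyword-with-value branch
      have hskip : ∀ (vals' : PySem.Dict String Int) (wt' bt' wi' bi' mg' mt' : Option Int) (d' : Int),
          (tok = "wtime" ∨ tok = "btime" ∨ tok = "winc" ∨ tok = "binc" ∨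
           tok = "movestogo" ∨ tok = "movetime" ∨ tok = "depth") →
          vals'.get? "wtime" = wt' → vals'.get? "btime" = bt' →
          vals'.get? "winc" = wi' → vals'.get? "binc" = bi' →
          vals'.get? "movestogo" = mg' → vals'.get? "movetime" = mt' →
          vals'.getD "depth" 4 = d' →
          pvALoop parts (i + 2) wt' bt' wi' bi' mg' mt' d' =
            (let v := pvBLoop parts (i + 1) vals'
             (v.get? "wtime", v.get? "btime", v.get? "winc", v.get? "binc",
              v.get? "movestogo", v.get? "movetime", v.getD "depth" 4)) := by
        intro vals' wt' bt' wi' bi' mg' mt' d' hkw e1 e2 e3 e4 e5 e6 e7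
        have hps := hpre i hi h2 hkw
        obtain ⟨hnc, hninf⟩ := pvParsable_not_kw hps
        -- B's step at i+1 is a no-op: value token is not "infinite" and not a keyword
        rw [pvBLoop]
        simp only [h2, if_true, hninf, hnc, Bool.false_eq_true, false_and, if_false, reduceIte]
        exact pvLoop_eq parts hpre (i + 2) (by omega) vals' wt' bt' wi' bi' mg' mt' d'
          e1 e2 e3 e4 e5 e6 e7
      by_cases e1 : tok = "wtime"
      · simp only [e1, h2, and_true, if_true, reduceIte, String.reduceEq, pvKeywords,
          List.contains_cons, String.reduceBEq, Bool.true_or, Bool.or_true, Bool.false_or, true_and]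
        exact hskip _ _ _ _ _ _ _ _ (Or.inl e1)
          (by simp [PySem.Dict.get?_insert, hwt]) (by simp [PySem.Dict.get?_insert, hbt])
          (by simp [PySem.Dict.get?_insert, hwi]) (by simp [PySem.Dict.get?_insert, hbi])
          (by simp [PySem.Dict.get?_insert, hmg]) (by simp [PySem.Dict.get?_insert, hmt])
          (by simp [PySem.Dict.getD_insert, hd])
      by_cases e2 : tok = "btime"
      · simp only [e1, e2, h2, and_true, if_true, if_false, reduceIte, String.reduceEq, pvKeywords,
          List.contains_cons, String.reduceBEq, Bool.true_or, Bool.or_true, Bool.false_or, true_and]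
        exact hskip _ _ _ _ _ _ _ _ (Or.inr (Or.inl e2))
          (by simp [PySem.Dict.get?_insert, hwt]) (by simp [PySem.Dict.get?_insert, hbt])
          (by simp [PySem.Dict.get?_insert, hwi]) (by simp [PySem.Dict.get?_insert, hbi])
          (by simp [PySem.Dict.get?_insert, hmg]) (by simp [PySem.Dict.get?_insert, hmt])
          (by simp [PySem.Dict.getD_insert, hd])
      by_cases e3 : tok = "winc"
      · simp only [e1, e2, e3, h2, and_true, if_true, if_false, reduceIte, String.reduceEq, pvKeywords,
          List.contains_cons, String.reduceBEq, Bool.true_or, Bool.or_true, Bool.false_or, true_and]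
        exact hskip _ _ _ _ _ _ _ _ (Or.inr (Or.inr (Or.inl e3)))
          (by simp [PySem.Dict.get?_insert, hwt]) (by simp [PySem.Dict.get?_insert, hbt])
          (by simp [PySem.Dict.get?_insert, hwi]) (by simp [PySem.Dict.get?_insert, hbi])
          (by simp [PySem.Dict.get?_insert, hmg]) (by simp [PySem.Dict.get?_insert, hmt])
          (by simp [PySem.Dict.getD_insert, hd])
      by_cases e4 : tok = "binc"
      · simp only [e1, e2, e3, e4, h2, and_true, if_true, if_false, reduceIte, String.reduceEq, pvKeywords,
          List.contains_cons, String.reduceBEq, Bool.true_or, Bool.or_true, Bool.false_or, true_and]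
        exact hskip _ _ _ _ _ _ _ _ (Or.inr (Or.inr (Or.inr (Or.inl e4))))
          (by simp [PySem.Dict.get?_insert, hwt]) (by simp [PySem.Dict.get?_insert, hbt])
          (by simp [PySem.Dict.get?_insert, hwi]) (by simp [PySem.Dict.get?_insert, hbi])
          (by simp [PySem.Dict.get?_insert, hmg]) (by simp [PySem.Dict.get?_insert, hmt])
          (by simp [PySem.Dict.getD_insert, hd])
      by_cases e5 : tok = "movestogo"
      · simp only [e1, e2, e3, e4, e5, h2, and_true, if_true, if_false, reduceIte, String.reduceEq, pvKeywords,
          List.contains_cons, String.reduceBEq, Bool.true_or, Bool.or_true, Bool.false_or, true_and]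
        exact hskip _ _ _ _ _ _ _ _ (Or.inr (Or.inr (Or.inr (Or.inr (Or.inl e5)))))
          (by simp [PySem.Dict.get?_insert, hwt]) (by simp [PySem.Dict.get?_insert, hbt])
          (by simp [PySem.Dict.get?_insert, hwi]) (by simp [PySem.Dict.get?_insert, hbi])
          (by simp [PySem.Dict.get?_insert, hmg]) (by simp [PySem.Dict.get?_insert, hmt])
          (by simp [PySem.Dict.getD_insert, hd])
      by_cases e6 : tok = "movetime"
      · simp only [e1, e2, e3, e4, e5, e6, h2, and_true, if_true, if_false, reduceIte, String.reduceEq, pvKeywords,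
          List.contains_cons, String.reduceBEq, Bool.true_or, Bool.or_true, Bool.false_or, true_and]
        exact hskip _ _ _ _ _ _ _ _ (Or.inr (Or.inr (Or.inr (Or.inr (Or.inr (Or.inl e6))))))
          (by simp [PySem.Dict.get?_insert, hwt]) (by simp [PySem.Dict.get?_insert, hbt])
          (by simp [PySem.Dict.get?_insert, hwi]) (by simp [PySem.Dict.get?_insert, hbi])
          (by simp [PySem.Dict.get?_insert, hmg]) (by simp [PySem.Dict.get?_insert, hmt])
          (by simp [PySem.Dict.getD_insert, hd])
      by_cases e7 : tok = "depth"
      · simp only [e1, e2, e3, e4, e5, e6, e7, h2, and_true, if_true, if_false, reduceIte, String.reduceEq,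
          pvKeywords, List.contains_cons, String.reduceBEq, Bool.true_or, Bool.or_true, Bool.false_or, true_and]
        exact hskip _ _ _ _ _ _ _ _ (Or.inr (Or.inr (Or.inr (Or.inr (Or.inr (Or.inr e7))))))
          (by simp [PySem.Dict.get?_insert, hwt]) (by simp [PySem.Dict.get?_insert, hbt])
          (by simp [PySem.Dict.get?_insert, hwi]) (by simp [PySem.Dict.get?_insert, hbi])
          (by simp [PySem.Dict.get?_insert, hmg]) (by simp [PySem.Dict.get?_insert, hmt])
          (by simp [PySem.Dict.getD_insert, hd])
      · -- tok is not a value keyword: maybe "infinite", else skip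
        have hnc : pvKeywords.contains tok = false := by
          simp [pvKeywords, List.contains_cons, e1, e2, e3, e4, e5, e6, e7]
        simp only [e1, e2, e3, e4, e5, e6, e7, false_and, if_false, reduceIte, hnc,
          Bool.false_eq_true]
        by_cases e8 : tok = "infinite"
        · simp only [e8, if_true, reduceIte]
          exact pvLoop_eq parts hpre (i + 1) (by omega) (vals.insert "depth" 20)
            wt bt wi bi mg mt 20
            (by simp [PySem.Dict.get?_insert, hwt]) (by simp [PySem.Dict.get?_insert, hbt])
            (by simp [PySem.Dict.get?_insert, hwi]) (by simp [PySem.Dict.get?_insert, hbi])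
            (by simp [PySem.Dict.get?_insert, hmg]) (by simp [PySem.Dict.get?_insert, hmt])
            (by simp [PySem.Dict.getD_insert])
        · simp only [e8, if_false, reduceIte]
          exact pvLoop_eq parts hpre (i + 1) (by omega) vals wt bt wi bi mg mt d
            hwt hbt hwi hbi hmg hmt hd
    · -- no room for a value: every keyword-with-value condition is false on both sides
      simp only [h2, and_false, if_false, reduceIte]
      by_cases e8 : tok = "infinite"
      · simp only [e8, if_true, reduceIte]
        exact pvLoop_eq parts hpre (i + 1) (by omega) (vals.insert "depth" 20)
          wt bt wi bi mg mt 20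
          (by simp [PySem.Dict.get?_insert, hwt]) (by simp [PySem.Dict.get?_insert, hbt])
          (by simp [PySem.Dict.get?_insert, hwi]) (by simp [PySem.Dict.get?_insert, hbi])
          (by simp [PySem.Dict.get?_insert, hmg]) (by simp [PySem.Dict.get?_insert, hmt])
          (by simp [PySem.Dict.getD_insert])
      · simp only [e8, if_false, reduceIte]
        exact pvLoop_eq parts hpre (i + 1) (by omega) vals wt bt wi bi mg mt d
          hwt hbt hwi hbi hmg hmt hd
  · simp only [hlen, if_false]
    simp [hwt, hbt, hwi, hbi, hmg, hmt, hd]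
termination_by parts.length - i
decreasing_by all_goals omega

-- ===== VERDICT (by name: the statement is the Claim_ definition above) =====
theorem parse_time_control_spec : Claim_equal_parse_time_control := by
  intro parts _ hpre
  unfold Spec_parse_time_control parse_time_control parse_time_control_alt
  exact pvLoop_eq parts hpre 1 (by omega) PySem.Dict.empty none none none none none none 4
    (by simp) (by simp) (by simp) (by simp) (by simp) (by simp) (by simp)
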